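-- pv_equiv track=rewrite | github.com/OCoderO/Elements-of-Software-Design---UT-Austin | Palindromic String - A8/Palindrome.py | smallest_palindrome
-- ===== SOURCE A (Python) =====
-- def isPalindrome(s):
--     if s == s[::-1]:
--         return True
--
-- def smallest_palindrome(str):
--     #Check if original str is already a palindrome
--     if isPalindrome(str) == True:
--         return str
--     else:
--         for i in range(len(str)):
--             if isPalindrome(str[:i]) == True:
--                 root = str[:i]      #find the root of the palindrome
--                 suffix = str[i:]    #find the suffix
--         reverse = suffix[::-1]      #find the reverse of the suffix and add it to the beginning
--         return reverse + root + suffix  #return the created palindrome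
-- ===== SOURCE B (Python) =====
-- def smallest_palindrome(str):
--     # KMP failure function on t = str + sep + reversed(str): the final failure value
--     # is the length of the longest palindromic prefix of str; prepend the rest of rev.
--     rev = str[::-1]
--     t = str + "\x00" + rev
--     fail = [0]          # fail[j] = length of the longest proper border of t[:j+1]
--     k = 0
--     for c in t[1:]:
--         while k > 0 and c != t[k]:
--             k = fail[k - 1]
--         if c == t[k]:
--             k += 1
--         fail.append(k)
--     return rev[:len(str) - k] + str
-- ===== Notes on version B (the rewrite author's own statement) =====
-- stated objective: faster
-- what changed: A tests every prefix for palindromicity by building its reversal (quadratic); B runs one KMP failure-function pass over str + '\x00' + reversed(str), whose final failure value is the length of the longest palindromic prefix, and prepends the reversed remainder.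
import Mathlib
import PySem

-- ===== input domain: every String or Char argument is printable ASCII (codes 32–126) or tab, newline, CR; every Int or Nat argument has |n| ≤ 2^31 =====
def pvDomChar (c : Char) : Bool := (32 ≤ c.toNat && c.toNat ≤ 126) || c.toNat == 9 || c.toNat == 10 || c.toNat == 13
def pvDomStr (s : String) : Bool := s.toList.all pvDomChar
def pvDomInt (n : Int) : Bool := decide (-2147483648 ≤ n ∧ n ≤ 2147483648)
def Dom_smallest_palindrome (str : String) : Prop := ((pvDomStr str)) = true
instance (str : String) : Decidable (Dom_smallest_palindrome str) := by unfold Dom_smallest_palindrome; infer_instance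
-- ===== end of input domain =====

-- B replaces A's quadratic scan over all prefixes (each tested for palindromicity by reversal)
-- by a single KMP failure-function pass over str + '\x00' + reversed(str) (objective: faster, asymptotic).

-- ===== PORT A =====
-- string slicing/reversal is ported over List Char; all slice bounds here are nonnegative, where
-- Python's str[:i] / s[::-1] are exactly List.take / List.reverse
def pvIsPalindrome (s : List Char) : Option Bool :=
  if s = s.reverse then some true else none   -- Python returns True or (implicitly) None

def smallest_palindrome (str : String) : String :=
  let s := str.toList
  if pvIsPalindrome s = some true then str
  else
    -- Python's root/suffix start unassigned, but in this branch i = 0 always assigns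
    -- root = '', suffix = str, so the fold's initial state is exactly that first assignment.
    let rs := (PySem.List.pyRange 0 (s.length : Int) 1).foldl
      (fun st i =>
        if pvIsPalindrome (s.take i.toNat) = some true then (s.take i.toNat, s.drop i.toNat)
        else st)
      ([], s)
    String.ofList (rs.2.reverse ++ rs.1 ++ rs.2)

-- ===== PORT B =====
-- 'while k > 0 and c != t[k]: k = fail[k-1]'; the 'min … k' is only a termination guard:
-- the failure table always satisfies fail[k-1] ≤ k-1 < k (proved below), so it never alters the value.
def pvShrink (t : List Char) (fail : List Nat) (c : Char) : Nat → Nat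
  | 0 => 0
  | (k+1) =>
    if c = t.getD (k+1) default then k+1
    else pvShrink t fail c (min (fail.getD k 0) k)
  decreasing_by exact Nat.lt_succ_of_le (Nat.min_le_right _ _)

-- 'fail = [0]; k = 0; for c in t[1:]: …; fail.append(k)'
def pvFailK (t : List Char) : List Nat × Nat :=
  (t.drop 1).foldl
    (fun st c =>
      let k := pvShrink t st.1 c st.2
      let k' := if c = t.getD k default then k + 1 else k
      (st.1 ++ [k'], k'))
    ([0], 0)

def smallest_palindrome_alt (str : String) : String :=
  let s := str.toList
  let rev := s.reverse
  let t := s ++ Char.ofNat 0 :: rev           -- str + "\x00" + rev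
  let k := (pvFailK t).2
  -- Python rev[:len(str)-k]: k ≤ len(str) on the stated domain (proved below), so the index is ≥ 0
  String.ofList (rev.take (s.length - k) ++ s)

-- ===== PRECONDITION & SPEC =====
def Spec_smallest_palindrome (str : String) (out : String) : Prop := out = smallest_palindrome_alt str
instance (str : String) (out : String) : Decidable (Spec_smallest_palindrome str out) := by unfold Spec_smallest_palindrome; infer_instance

-- ===== CLAIM (what is proved, stated in full; the proofs are below) =====
def Claim_equal_smallest_palindrome : Prop := ∀ (str : String), Dom_smallest_palindrome str → Spec_smallest_palindrome str (smallest_palindrome str)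

-- ===== LEMMAS AND PROOFS =====

-- length of the longest palindromic prefix of s of length ≤ m
def pvMp (s : List Char) : Nat → Nat
  | 0 => 0
  | (m+1) => if s.take (m+1) = (s.take (m+1)).reverse then m+1 else pvMp s m

-- length of the longest palindromic prefix of s of length < m (what A's ascending loop keeps)
def pvMb (s : List Char) : Nat → Nat
  | 0 => 0
  | (m+1) => if s.take m = (s.take m).reverse then m else pvMb s m

-- length of the longest proper border of t.take i (0 if none)
def pvLpb (t : List Char) (i : Nat) : Nat :=
  Nat.findGreatest (fun b => 0 < b ∧ b < i ∧ t.take b <:+ t.take i) i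

-- the value pvShrink is claimed to compute: the longest b ≤ k that is a border of t.take i
-- whose following character is c
def pvG (t : List Char) (i : Nat) (c : Char) (k : Nat) : Nat :=
  Nat.findGreatest (fun b => 0 < b ∧ t.take b <:+ t.take i ∧ c = t.getD b default) k

theorem pvMp_succ (s : List Char) (m : Nat) :
    pvMp s (m+1) = if s.take (m+1) = (s.take (m+1)).reverse then m+1 else pvMp s m := rfl

theorem pvMb_succ (s : List Char) (m : Nat) :
    pvMb s (m+1) = if s.take m = (s.take m).reverse then m else pvMb s m := rfl

theorem pvMb_eq (s : List Char) (m : Nat) : pvMb s (m+1) = pvMp s m := by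
  induction m with
  | zero => simp [pvMb, pvMp]
  | succ m ih => rw [pvMb_succ, pvMp_succ, ih]

theorem pvMp_eq_fg (s : List Char) (m : Nat) :
    pvMp s m = Nat.findGreatest (fun j => s.take j = (s.take j).reverse) m := by
  induction m with
  | zero => rfl
  | succ m ih => rw [pvMp_succ, Nat.findGreatest_succ, ih]

theorem pvFGprop {p : Nat → Prop} [DecidablePred p] (n : Nat)
    (h : Nat.findGreatest p n ≠ 0) : p (Nat.findGreatest p n) :=
  (Nat.findGreatest_eq_iff.mp rfl).2.1 h

theorem pvLpb_prop (t : List Char) (i : Nat) (h : pvLpb t i ≠ 0) :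
    0 < pvLpb t i ∧ pvLpb t i < i ∧ t.take (pvLpb t i) <:+ t.take i :=
  pvFGprop (p := fun b => 0 < b ∧ b < i ∧ t.take b <:+ t.take i) i h

theorem pvLpb_lt (t : List Char) (i : Nat) (hi : 0 < i) : pvLpb t i < i := by
  rcases Nat.eq_zero_or_pos (pvLpb t i) with h | h
  · omega
  · exact (pvLpb_prop t i (by omega)).2.1

theorem pvLpb_suffix (t : List Char) (i : Nat) : t.take (pvLpb t i) <:+ t.take i := by
  rcases Nat.eq_zero_or_pos (pvLpb t i) with h | h
  · rw [h]; simp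
  · exact (pvLpb_prop t i (by omega)).2.2

theorem pvLpb_is_greatest (t : List Char) (i b : Nat) (hb0 : 0 < b) (hbi : b < i)
    (hs : t.take b <:+ t.take i) : b ≤ pvLpb t i := by
  by_contra h
  have h1 : pvLpb t i < b := by omega
  exact Nat.findGreatest_is_greatest h1 (le_of_lt hbi) ⟨hb0, hbi, hs⟩

theorem pvLpb_one (t : List Char) : pvLpb t 1 = 0 := by
  unfold pvLpb
  have hnp : ¬(0 < 1 ∧ 1 < 1 ∧ t.take 1 <:+ t.take 1) := by simp
  rw [Nat.findGreatest_succ, if_neg hnp]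
  rfl

theorem pvFG_ext {p : Nat → Prop} [DecidablePred p] (m : Nat) :
    ∀ n, m ≤ n → (∀ b, m < b → b ≤ n → ¬ p b) → Nat.findGreatest p n = Nat.findGreatest p m := by
  intro n
  induction n with
  | zero => intro h _; have : m = 0 := by omega
            rw [this]
  | succ n ih =>
    intro hm hb
    rcases Nat.eq_or_lt_of_le hm with he | hl
    · rw [he]
    · rw [Nat.findGreatest_succ, if_neg (hb (n+1) hl (le_refl _))]
      exact ih (by omega) (fun b h1 h2 => hb b h1 (by omega))

theorem pvConcat_suffix_concat {α : Type} (a c : α) (u v : List α) :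
    u ++ [a] <:+ v ++ [c] ↔ a = c ∧ u <:+ v := by
  rw [← List.reverse_prefix]
  simp only [List.reverse_append, List.reverse_singleton, List.singleton_append,
    List.cons_prefix_cons, List.reverse_prefix]

theorem pvSuffix_succ (t : List Char) (b i : Nat) (hb : b < t.length) (hi : i < t.length) :
    t.take (b+1) <:+ t.take (i+1) ↔ (t.getD b default = t.getD i default ∧ t.take b <:+ t.take i) := by
  rw [← List.take_concat_get hb, ← List.take_concat_get hi]
  simp only [List.concat_eq_append, pvConcat_suffix_concat,
    List.getD_eq_getElem t default hb, List.getD_eq_getElem t default hi]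

theorem pvTake_len (t : List Char) (b : Nat) (h : b ≤ t.length) : (t.take b).length = b := by
  simp [List.length_take]; omega

theorem pvShrink_eq (t : List Char) (i : Nat) (c : Char) (hi : i ≤ t.length)
    (fail : List Nat) (hfail : ∀ m, m < i → fail.getD m 0 = pvLpb t (m+1)) :
    ∀ k, k < i → t.take k <:+ t.take i → pvShrink t fail c k = pvG t i c k := by
  intro k
  induction k using Nat.strong_induction_on with
  | _ k ih =>
    cases k with
    | zero => intro _ _; simp [pvShrink, pvG]
    | succ k' =>
      intro hk hsuf
      by_cases hc : c = t.getD (k'+1) default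
      · rw [pvShrink, if_pos hc]
        unfold pvG
        rw [Nat.findGreatest_succ, if_pos ⟨Nat.succ_pos _, hsuf, hc⟩]
      · rw [pvShrink, if_neg hc]
        have hlk : fail.getD k' 0 = pvLpb t (k'+1) := hfail k' (by omega)
        have hle : pvLpb t (k'+1) ≤ k' := by
          have := pvLpb_lt t (k'+1) (Nat.succ_pos _); omega
        rw [hlk, Nat.min_eq_left hle]
        have hsm : t.take (pvLpb t (k'+1)) <:+ t.take i :=
          (pvLpb_suffix t (k'+1)).trans hsuf
        rw [ih (pvLpb t (k'+1)) (by omega) (by omega) hsm]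
        unfold pvG
        rw [Nat.findGreatest_succ, if_neg (fun hp => hc hp.2.2)]
        refine (pvFG_ext _ _ hle ?_).symm
        intro b h1 h2 hp
        have hbl : t.take b <:+ t.take (k'+1) := by
          refine List.suffix_of_suffix_length_le hp.2.1 hsuf ?_
          rw [pvTake_len t b (by omega), pvTake_len t (k'+1) (by omega)]
          omega
        have := pvLpb_is_greatest t (k'+1) b hp.1 (by omega) hbl
        omega

theorem pvG_le (t : List Char) (i : Nat) (c : Char) (k : Nat) : pvG t i c k ≤ k :=
  Nat.findGreatest_le k

theorem pvG_spec (t : List Char) (i : Nat) (c : Char) (k : Nat) (h : pvG t i c k ≠ 0) :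
    0 < pvG t i c k ∧ t.take (pvG t i c k) <:+ t.take i ∧ c = t.getD (pvG t i c k) default :=
  pvFGprop (p := fun b => 0 < b ∧ t.take b <:+ t.take i ∧ c = t.getD b default) k h

theorem pvG_is_greatest (t : List Char) (i : Nat) (c : Char) (k b : Nat)
    (h1 : pvG t i c k < b) (h2 : b ≤ k) :
    ¬(0 < b ∧ t.take b <:+ t.take i ∧ c = t.getD b default) :=
  Nat.findGreatest_is_greatest h1 h2

-- one iteration of the outer loop advances the failure state from pvLpb t i to pvLpb t (i+1)
theorem pvStep (t : List Char) (i : Nat) (hi1 : 1 ≤ i) (hi : i < t.length)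
    (fail : List Nat) (hfail : ∀ m, m < i → fail.getD m 0 = pvLpb t (m+1)) :
    (if t.getD i default = t.getD (pvShrink t fail (t.getD i default) (pvLpb t i)) default
     then pvShrink t fail (t.getD i default) (pvLpb t i) + 1
     else pvShrink t fail (t.getD i default) (pvLpb t i)) = pvLpb t (i+1) := by
  set c := t.getD i default with hcdef
  have hk0 : pvLpb t i < i := pvLpb_lt t i (by omega)
  have hsuf : t.take (pvLpb t i) <:+ t.take i := pvLpb_suffix t i
  rw [pvShrink_eq t i c (by omega) fail hfail (pvLpb t i) hk0 hsuf]
  set g := pvG t i c (pvLpb t i) with hgdef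
  have hgk : g ≤ pvLpb t i := pvG_le t i c (pvLpb t i)
  by_cases hc : c = t.getD g default
  · rw [if_pos hc]
    symm
    unfold pvLpb
    rw [Nat.findGreatest_eq_iff]
    refine ⟨by omega, ?_, ?_⟩
    · intro _
      refine ⟨by omega, by omega, ?_⟩
      rw [pvSuffix_succ t g i (by omega) hi]
      refine ⟨hc.symm.trans hcdef, ?_⟩
      rcases Nat.eq_zero_or_pos g with h0 | h0
      · rw [h0]; simp
      · exact (pvG_spec t i c (pvLpb t i) (by omega)).2.1
    · intro b hb1 hb2 hp
      obtain ⟨hb0, hbi, hbs⟩ := hp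
      cases b with
      | zero => omega
      | succ b' =>
        rw [pvSuffix_succ t b' i (by omega) hi] at hbs
        obtain ⟨he, hs⟩ := hbs
        have hb'k : b' ≤ pvLpb t i := by
          rcases Nat.eq_zero_or_pos b' with h0 | h0
          · omega
          · exact pvLpb_is_greatest t i b' h0 (by omega) hs
        exact pvG_is_greatest t i c (pvLpb t i) b' (by omega) hb'k
          ⟨by omega, hs, hcdef.symm.trans he.symm⟩
  · rw [if_neg hc]
    have hg0 : g = 0 := by
      by_contra h
      exact hc (pvG_spec t i c (pvLpb t i) h).2.2
    have : pvLpb t (i+1) = 0 := by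
      unfold pvLpb
      rw [Nat.findGreatest_eq_zero_iff]
      intro b hb0 hbL hp
      obtain ⟨_, hbi, hbs⟩ := hp
      cases b with
      | zero => omega
      | succ b' =>
        rw [pvSuffix_succ t b' i (by omega) hi] at hbs
        obtain ⟨he, hs⟩ := hbs
        rcases Nat.eq_zero_or_pos b' with h0 | h0
        · rw [h0] at he
          apply hc
          rw [hg0, hcdef]
          exact he.symm
        · have hb'k : b' ≤ pvLpb t i := pvLpb_is_greatest t i b' h0 (by omega) hs
          exact pvG_is_greatest t i c (pvLpb t i) b' (by omega) hb'k
            ⟨h0, hs, hcdef.symm.trans he.symm⟩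
    omega

-- the fold invariant: after j iterations the state is the table of pvLpb values
theorem pvFailK_inv (t : List Char) :
    ∀ j, j ≤ t.length - 1 →
      ((t.drop 1).take j).foldl
        (fun st c =>
          let k := pvShrink t st.1 c st.2
          let k' := if c = t.getD k default then k + 1 else k
          (st.1 ++ [k'], k'))
        ([0], 0)
      = ((List.range (j+1)).map (fun m => pvLpb t (m+1)), pvLpb t (j+1)) := by
  intro j
  induction j with
  | zero =>
    intro _
    simp [List.range_succ, pvLpb_one]
  | succ j ih =>
    intro hj
    have hjlen : j < (t.drop 1).length := by
      rw [List.length_drop]; omega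
    rw [← List.take_concat_get hjlen, List.concat_eq_append, List.foldl_append,
      ih (by omega)]
    simp only [List.foldl_cons, List.foldl_nil]
    have hget : (t.drop 1)[j] = t.getD (j+1) default := by
      rw [List.getElem_drop, List.getD_eq_getElem t default (by omega)]
      congr 1
      omega
    have hfail : ∀ m, m < j+1 →
        ((List.range (j+1)).map (fun m => pvLpb t (m+1))).getD m 0 = pvLpb t (m+1) := by
      intro m hm
      rw [List.getD_eq_getElem _ 0 (by simp; omega)]
      simp
    have hstep := pvStep t (j+1) (by omega) (by omega)
      ((List.range (j+1)).map (fun m => pvLpb t (m+1))) hfail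
    rw [hget, hstep]
    rw [show j+1+1 = j+2 from rfl]
    congr 1
    rw [List.range_succ (n := j+1), List.map_append]
    simp

-- the failure value after the whole pass is the longest proper border of t
theorem pvFailK_val (t : List Char) (ht : t ≠ []) : (pvFailK t).2 = pvLpb t t.length := by
  have hlen : 1 ≤ t.length := by
    cases t with
    | nil => exact absurd rfl ht
    | cons a l => simp
  unfold pvFailK
  have := pvFailK_inv t (t.length - 1) (le_refl _)
  rw [show (t.drop 1).take (t.length - 1) = t.drop 1 by
        rw [← List.length_drop (i := 1) (l := t)]; exact List.take_length] at this
  rw [this]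
  have h1 : t.length - 1 + 1 = t.length := by omega
  rw [show (((List.range (t.length - 1 + 1)).map (fun m => pvLpb t (m+1)), pvLpb t (t.length - 1 + 1)) : List Nat × Nat).2
        = pvLpb t (t.length - 1 + 1) from rfl, h1]

theorem pvPal_border_suffix (l : List Char) (sep : Char) (b : Nat) (hb : b ≤ l.length)
    (hpal : l.take b = (l.take b).reverse) :
    (l ++ sep :: l.reverse).take b <:+ (l ++ sep :: l.reverse) := by
  rw [List.take_append_of_le_length hb, hpal, List.reverse_take]
  exact (List.drop_suffix _ _).trans ((List.suffix_cons sep _).trans (List.suffix_append _ _))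

-- with a separator absent from l, the longest proper border of l ++ sep :: l.reverse
-- is the longest palindromic prefix of l
theorem pvLpb_pal (l : List Char) (sep : Char) (hsep : sep ∉ l) :
    pvLpb (l ++ sep :: l.reverse) (l ++ sep :: l.reverse).length = pvMp l l.length := by
  set t := l ++ sep :: l.reverse with htdef
  set n := l.length with hndef
  have hL : t.length = n + 1 + n := by
    simp [htdef, hndef, List.length_append]
    omega
  rw [pvMp_eq_fg]
  set K := Nat.findGreatest (fun j => l.take j = (l.take j).reverse) n with hKdef
  have hKn : K ≤ n := Nat.findGreatest_le n
  have hKpal : l.take K = (l.take K).reverse := by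
    rcases Nat.eq_zero_or_pos K with h0 | h0
    · rw [h0]; simp
    · exact (Nat.findGreatest_eq_iff.mp hKdef.symm).2.1 (by omega)
  unfold pvLpb
  rw [Nat.findGreatest_eq_iff]
  refine ⟨by omega, ?_, ?_⟩
  · intro hK0
    refine ⟨by omega, by omega, ?_⟩
    rw [List.take_length]
    exact pvPal_border_suffix l sep K hKn hKpal
  · intro b hb1 hb2 hp
    obtain ⟨hb0, hbL, hbs⟩ := hp
    rw [List.take_length] at hbs
    by_cases hbn : b ≤ n
    · -- a short border forces a palindromic prefix longer than K: contradiction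
      have hsuf2 : (l.take b).reverse <:+ t := by
        rw [List.reverse_take]
        exact (List.drop_suffix _ _).trans
          ((List.suffix_cons sep _).trans (List.suffix_append _ _))
      have htb : t.take b = l.take b := List.take_append_of_le_length hbn
      have heq : l.take b = (l.take b).reverse := by
        have h1 : l.take b <:+ t := htb ▸ hbs
        have hlen1 : (l.take b).length = ((l.take b).reverse).length := by simp
        exact (List.suffix_of_suffix_length_le h1 hsuf2 (le_of_eq hlen1)).eq_of_length hlen1
      exact Nat.findGreatest_is_greatest (hKdef ▸ hb1) hbn heq
    · -- a long border would have to match the separator against a character of l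
      rw [not_le] at hbn
      have hdrop : t.take b = t.drop (t.length - b) := by
        rw [List.suffix_iff_eq_drop] at hbs
        rw [hbs, pvTake_len t b (by omega)]
      have hblen : b ≤ t.length := by omega
      have hn_lt_b : n < (t.take b).length := by rw [pvTake_len t b hblen]; omega
      have hsep_pos : t[n]'(by omega) = sep := by
        have : t[n]'(by omega) = (sep :: l.reverse)[n - l.length]'(by simp; omega) := by
          exact List.getElem_append_right (by omega)
        rw [this]
        simp [hndef]
      have hj : t.length - b + n < t.length := by omega
      have hj_lo : n < t.length - b + n := by omega
      have htj : t[t.length - b + n]'hj ∈ l.reverse := by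
        have hsplit : t = (l ++ [sep]) ++ l.reverse := by simp [htdef]
        have e1 := List.getElem_of_eq hsplit hj
        have e2 : ((l ++ [sep]) ++ l.reverse)[t.length - b + n]'(hsplit ▸ hj)
            = l.reverse[t.length - b + n - (l ++ [sep]).length]'(by
                simp only [List.length_append, List.length_reverse, List.length_cons,
                  List.length_nil] at *
                omega) :=
          List.getElem_append_right (by
            simp only [List.length_append, List.length_cons, List.length_nil]
            omega)
        rw [e1, e2]
        exact List.getElem_mem _
      have hcontr : t[n]'(by omega) = t[t.length - b + n]'hj := by
        have e1 : (t.take b)[n]'hn_lt_b = t[n]'(by omega) := List.getElem_take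
        have e2 : (t.drop (t.length - b))[n]'(by rw [← hdrop]; exact hn_lt_b)
            = t[t.length - b + n]'hj := List.getElem_drop
        rw [← e1, ← e2]
        congr 1
      rw [hsep_pos] at hcontr
      rw [List.mem_reverse] at htj
      exact hsep (hcontr ▸ htj)

-- A's fold over range(m) keeps the last palindromic proper prefix seen
theorem pvFold_eq (s : List Char) (m : Nat) :
    (PySem.List.pyRange 0 (m : Int) 1).foldl
      (fun st i =>
        if pvIsPalindrome (s.take i.toNat) = some true then (s.take i.toNat, s.drop i.toNat)
        else st)
      ([], s)
    = (s.take (pvMb s m), s.drop (pvMb s m)) := by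
  induction m with
  | zero => simp [PySem.List.pyRange_one_eq_nil, pvMb]
  | succ m ih =>
    rw [show ((m + 1 : Nat) : Int) = (m : Int) + 1 by push_cast; ring,
        PySem.List.pyRange_one_succ_right (by exact_mod_cast Nat.zero_le m),
        List.foldl_append, ih]
    simp only [List.foldl_cons, List.foldl_nil, Int.toNat_natCast, pvIsPalindrome, pvMb]
    by_cases h : s.take m = (s.take m).reverse
    · simp only [if_pos h]
      simp
    · simp only [if_neg h]
      rw [if_neg (by simp)]

theorem pvSep_not_mem (str : String) (h : Dom_smallest_palindrome str) :
    Char.ofNat 0 ∉ str.toList := by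
  intro hmem
  have hall := List.all_eq_true.mp h _ hmem
  exact absurd hall (by decide)

-- B's result, in closed form: the reversed remainder past the longest palindromic prefix, then s
theorem pvAlt_eq (str : String) (h : Dom_smallest_palindrome str) :
    smallest_palindrome_alt str
      = String.ofList (str.toList.reverse.take (str.toList.length - pvMp str.toList str.toList.length)
          ++ str.toList) := by
  dsimp only [smallest_palindrome_alt]
  have hne : str.toList ++ Char.ofNat 0 :: str.toList.reverse ≠ [] := by simp
  rw [pvFailK_val _ hne, pvLpb_pal str.toList (Char.ofNat 0) (pvSep_not_mem str h)]

theorem pvMp_full (s : List Char) (hpal : s = s.reverse) : pvMp s s.length = s.length := by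
  cases hn : s.length with
  | zero => simp [pvMp]
  | succ m =>
    have ht : s.take (m+1) = s := by rw [← hn]; exact List.take_length
    rw [pvMp_succ, if_pos (by rw [ht]; exact hpal)]

-- ===== VERDICT (by name: the statement is the Claim_ definition above) =====
theorem smallest_palindrome_spec : Claim_equal_smallest_palindrome := by
  intro str hdom
  unfold Spec_smallest_palindrome smallest_palindrome
  rw [pvAlt_eq str hdom]
  dsimp only
  set s := str.toList with hs
  by_cases hpal : s = s.reverse
  · have hcond : pvIsPalindrome s = some true := by unfold pvIsPalindrome; rw [if_pos hpal]
    rw [if_pos hcond, pvMp_full s hpal]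
    simp [hs]
  · have hn : s.length ≠ 0 := fun h => hpal (by simp [List.eq_nil_of_length_eq_zero h])
    obtain ⟨m, hm⟩ : ∃ m, s.length = m + 1 := ⟨s.length - 1, by omega⟩
    have hcond : pvIsPalindrome s ≠ some true := by simp [pvIsPalindrome, hpal]
    have hmb : pvMb s s.length = pvMp s m := by rw [hm]; exact pvMb_eq s m
    have hmp : pvMp s s.length = pvMp s m := by
      have ht : s.take (m+1) = s := by rw [← hm]; exact List.take_length
      rw [hm, pvMp_succ, if_neg (fun hq => hpal (by rwa [ht] at hq))]
    rw [if_neg hcond, pvFold_eq s s.length, hmb, hmp, ← List.reverse_drop]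
    dsimp only
    rw [List.append_assoc, List.take_append_drop]
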